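-- pv_equiv track=rewrite | github.com/jackcogdill/Advent-of-Code | 2019/04/04.py | no_decrease
-- ===== SOURCE A (Python) =====
-- def no_decrease(n):
--     # Going from left to right, the digits never decrease; they only ever
--     # increase or stay the same (like 111123 or 135679).
--     t = n
--     prev = t % 10
--     t //= 10
--     while t > 0: # Iterate through digits backwards
--         d = t % 10
--         if prev < d: # Found decrease
--             return False
--         prev = d
--         t //= 10
--     return True
-- ===== SOURCE B (Python) =====
-- def no_decrease(n):
--     digits = []
--     t = n
--     while t > 0:
--         digits.append(t % 10)
--         t //= 10
--     return digits == sorted(digits, reverse=True)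
-- ===== Notes on version B (the rewrite author's own statement) =====
-- stated objective: simpler
-- what changed: Replaces the single-pass previous-digit comparison scan with materializing the digit list and comparing it to its descending sort.
import Mathlib
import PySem

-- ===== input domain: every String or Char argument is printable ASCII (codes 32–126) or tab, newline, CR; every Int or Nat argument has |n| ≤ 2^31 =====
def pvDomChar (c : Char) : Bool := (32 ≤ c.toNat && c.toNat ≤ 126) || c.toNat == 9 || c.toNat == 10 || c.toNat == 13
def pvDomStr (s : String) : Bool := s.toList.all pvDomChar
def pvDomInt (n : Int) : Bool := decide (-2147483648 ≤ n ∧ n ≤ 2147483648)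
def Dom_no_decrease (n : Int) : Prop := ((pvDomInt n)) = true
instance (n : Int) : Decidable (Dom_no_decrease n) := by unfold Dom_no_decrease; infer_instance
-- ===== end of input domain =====

-- B replaces A's running previous-digit comparison with building the digit list and comparing it to its descending sort (objective: simpler/alternative; no speed claim).

-- ===== PORT A =====
-- the while loop of A: state (prev, t)
def noDecLoop (prev t : Int) : Bool :=
  if h : t > 0 then
    let d := PySem.Int.mod t 10
    if prev < d then false
    else noDecLoop d (PySem.Int.floordiv t 10)
  else true
termination_by t.toNat
decreasing_by
  have h10 : (0:Int) < 10 := by omega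
  rw [PySem.Int.floordiv_eq_ediv_of_pos h10]
  omega

def no_decrease (n : Int) : Bool :=
  let t := n
  let prev := PySem.Int.mod t 10
  let t := PySem.Int.floordiv t 10
  noDecLoop prev t

-- ===== PORT B =====
-- the digit-extraction loop of B, appending to the accumulator like Python's list.append
def digitsLoop (t : Int) (acc : List Int) : List Int :=
  if h : t > 0 then
    digitsLoop (PySem.Int.floordiv t 10) (acc ++ [PySem.Int.mod t 10])
  else acc
termination_by t.toNat
decreasing_by
  have h10 : (0:Int) < 10 := by omega
  rw [PySem.Int.floordiv_eq_ediv_of_pos h10]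
  omega

def no_decrease_alt (n : Int) : Bool :=
  let digits := digitsLoop n []
  decide (digits = PySem.List.sorted digits (fun x => x) true)

-- ===== PRECONDITION & SPEC =====
def Spec_no_decrease (n : Int) (out : Bool) : Prop := out = no_decrease_alt n
instance (n : Int) (out : Bool) : Decidable (Spec_no_decrease n out) := by unfold Spec_no_decrease; infer_instance

-- ===== CLAIM (what is proved, stated in full; the proofs are below) =====
def Claim_equal_no_decrease : Prop := ∀ (n : Int), Dom_no_decrease n → Spec_no_decrease n (no_decrease n)

-- ===== LEMMAS AND PROOFS =====

theorem digitsLoop_acc_aux (k : Nat) : ∀ (t : Int), t.toNat ≤ k → ∀ acc,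
    digitsLoop t acc = acc ++ digitsLoop t [] := by
  induction k with
  | zero =>
    intro t ht acc
    have h : ¬ t > 0 := by omega
    rw [digitsLoop, dif_neg h, digitsLoop, dif_neg h]; simp
  | succ k ih =>
    intro t ht acc
    by_cases h : t > 0
    · have hlt : (PySem.Int.floordiv t 10).toNat ≤ k := by
        rw [PySem.Int.floordiv_eq_ediv_of_pos (by omega : (0:Int) < 10)]
        omega
      rw [digitsLoop, dif_pos h, ih _ hlt]
      conv_rhs => rw [digitsLoop, dif_pos h, ih _ hlt]
      simp
    · rw [digitsLoop, dif_neg h, digitsLoop, dif_neg h]; simp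

theorem digitsLoop_acc (t : Int) (acc : List Int) :
    digitsLoop t acc = acc ++ digitsLoop t [] :=
  digitsLoop_acc_aux t.toNat t le_rfl acc

-- A's loop returns true exactly when prev followed by the remaining digits is pairwise non-increasing
theorem noDecLoop_iff (prev t : Int) :
    noDecLoop prev t = true ↔
      (prev :: digitsLoop t []).Pairwise (fun a b => b ≤ a) := by
  induction prev, t using noDecLoop.induct with
  | case1 prev t h d hlt =>
    rw [noDecLoop, dif_pos h, if_pos hlt]
    rw [digitsLoop, dif_pos h, digitsLoop_acc]
    constructor
    · intro hc; exact absurd hc (by simp)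
    · intro hp
      have := (List.pairwise_cons.mp hp).1 (PySem.Int.mod t 10) (by simp)
      omega
  | case2 prev t h d hlt ih =>
    rw [noDecLoop, dif_pos h, if_neg hlt]
    rw [digitsLoop, dif_pos h, digitsLoop_acc]
    simp only [List.nil_append]
    rw [ih]
    rw [List.singleton_append]
    constructor
    · intro hp
      rw [List.pairwise_cons]
      refine ⟨?_, hp⟩
      intro b hb
      rw [List.mem_cons] at hb
      rcases hb with hb | hb
      · omega
      · have := (List.pairwise_cons.mp hp).1 b hb
        omega
    · intro hp
      exact (List.pairwise_cons.mp hp).2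
  | case3 prev t h =>
    rw [noDecLoop, dif_neg h, digitsLoop, dif_neg h]
    simp

-- B's comparison with the descending sort is exactly pairwise non-increasing
theorem sortedRev_self_iff (l : List Int) :
    (l = PySem.List.sorted l (fun x => x) true) ↔ l.Pairwise (fun a b => b ≤ a) := by
  constructor
  · intro h
    have := PySem.List.sorted_pairwise_rev (xs := l) (key := fun x => x)
    rw [← h] at this
    exact this
  · intro h
    exact (PySem.List.sorted_rev_eq_self_of_pairwise l (fun x => x) h).symm

theorem digitsLoop_nonpos (t : Int) (h : ¬ t > 0) : digitsLoop t [] = [] := by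
  rw [digitsLoop, dif_neg h]

-- ===== VERDICT (by name: the statement is the Claim_ definition above) =====
theorem no_decrease_spec : Claim_equal_no_decrease := by
  intro n _
  unfold Spec_no_decrease no_decrease no_decrease_alt
  simp only []
  rw [Bool.eq_iff_iff, decide_eq_true_iff, noDecLoop_iff, sortedRev_self_iff]
  by_cases h : n > 0
  · conv_rhs => rw [digitsLoop, dif_pos h, digitsLoop_acc]
    simp
  · rw [digitsLoop_nonpos n h]
    have h10 : (0:Int) < 10 := by omega
    have hf : ¬ PySem.Int.floordiv n 10 > 0 := by
      rw [PySem.Int.floordiv_eq_ediv_of_pos h10]; omega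
    rw [digitsLoop_nonpos _ hf]
    simp
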